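-- pv_equiv track=rewrite | github.com/koii-network/prometheus-beta | src/word_char_reversal.py | reverse_words_and_chars
-- ===== SOURCE A (Python) =====
-- def reverse_words_and_chars(input_string):
--     """
--     Reverse the order of words in a string and also reverse the characters of each word.
--
--     Args:
--         input_string (str): The input string to be transformed
--
--     Returns:
--         str: A string with words in reverse order and each word's characters reversed
--     """
--     if not isinstance(input_string, str):
--         raise TypeError("Input must be a string")
--
--     if not input_string:
--         return ""
--
--     # Split the string into words, reverse the order, reverse each word's characters
--     words = input_string.split()
--     reversed_words = [word[::-1] for word in words[::-1]]
--
--     return ' '.join(reversed_words)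
-- ===== SOURCE B (Python) =====
-- def reverse_words_and_chars(input_string):
--     if not isinstance(input_string, str):
--         raise TypeError("Input must be a string")
--     normalized = ' '.join(input_string.split())
--     return normalized[::-1]
-- ===== Notes on version B (the rewrite author's own statement) =====
-- stated objective: simpler
-- what changed: Replaces the per-word reversal comprehension plus word-list reversal with a single whole-string reversal of the whitespace-normalized string (' '.join(s.split())[::-1]), relying on the identity that one global reversal reverses both word order and each word's characters.
import Mathlib
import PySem

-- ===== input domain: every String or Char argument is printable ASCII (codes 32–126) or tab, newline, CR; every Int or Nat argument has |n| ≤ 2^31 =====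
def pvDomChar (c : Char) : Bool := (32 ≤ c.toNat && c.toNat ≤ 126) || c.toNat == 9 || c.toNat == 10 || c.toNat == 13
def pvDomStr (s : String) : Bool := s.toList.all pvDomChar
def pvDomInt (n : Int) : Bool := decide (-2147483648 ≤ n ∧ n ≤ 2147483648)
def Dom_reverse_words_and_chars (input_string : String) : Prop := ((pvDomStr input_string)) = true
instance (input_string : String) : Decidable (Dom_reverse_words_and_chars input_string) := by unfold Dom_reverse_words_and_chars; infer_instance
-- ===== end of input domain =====

-- B replaces A's per-word reversal comprehension plus word-list reversal with one whole-string
-- reversal of the whitespace-normalized string (simpler; same behaviour, return value only).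

-- ===== PORT A =====
def reverse_words_and_chars (input_string : String) : String :=
  if input_string = "" then ""
  else
    let words := PySem.Str.split₀ input_string
    let reversed_words :=
      ((PySem.List.slice? words none none (-1)).getD []).map
        (fun w => (PySem.Str.slice? w none none (-1)).getD "")
    PySem.Str.join " " reversed_words

-- ===== PORT B =====
def reverse_words_and_chars_alt (input_string : String) : String :=
  let normalized := PySem.Str.join " " (PySem.Str.split₀ input_string)
  (PySem.Str.slice? normalized none none (-1)).getD ""

-- ===== PRECONDITION & SPEC =====
def Spec_reverse_words_and_chars (input_string : String) (out : String) : Prop := out = reverse_words_and_chars_alt input_string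
instance (input_string : String) (out : String) : Decidable (Spec_reverse_words_and_chars input_string out) := by unfold Spec_reverse_words_and_chars; infer_instance

-- ===== CLAIM (what is proved, stated in full; the proofs are below) =====
def Claim_equal_reverse_words_and_chars : Prop := ∀ (input_string : String), Dom_reverse_words_and_chars input_string → Spec_reverse_words_and_chars input_string (reverse_words_and_chars input_string)

-- ===== LEMMAS AND PROOFS =====

theorem join_snoc (sep a : List Char) (x : List Char) (xs : List (List Char)) :
    PySem.Chars.join sep ((x :: xs) ++ [a]) = PySem.Chars.join sep (x :: xs) ++ sep ++ a := by
  induction xs generalizing x with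
  | nil => simp [PySem.Chars.join_cons_cons, PySem.Chars.join_singleton]
  | cons y ys ih =>
      have := ih y
      simp only [List.cons_append, PySem.Chars.join_cons_cons]
      rw [List.cons_append] at this
      rw [this]
      simp [List.append_assoc]

theorem rev_join (ws : List (List Char)) :
    (PySem.Chars.join [' '] ws).reverse
      = PySem.Chars.join [' '] ((ws.map List.reverse).reverse) := by
  induction ws with
  | nil => simp [PySem.Chars.join_nil]
  | cons w tail ih =>
      cases tail with
      | nil => simp [PySem.Chars.join_singleton]
      | cons v vs =>
          rw [PySem.Chars.join_cons_cons]
          have hne : ((v :: vs).map List.reverse).reverse ≠ [] := by simp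
          obtain ⟨x, xs, hx⟩ := List.exists_cons_of_ne_nil hne
          calc (w ++ [' '] ++ PySem.Chars.join [' '] (v :: vs)).reverse
              = (PySem.Chars.join [' '] (v :: vs)).reverse ++ [' '] ++ w.reverse := by
                simp [List.reverse_append, List.append_assoc]
            _ = PySem.Chars.join [' '] (((v :: vs).map List.reverse).reverse) ++ [' '] ++ w.reverse := by
                rw [ih]
            _ = PySem.Chars.join [' '] (((v :: vs).map List.reverse).reverse ++ [w.reverse]) := by
                rw [hx, join_snoc]
            _ = PySem.Chars.join [' '] (((w :: v :: vs).map List.reverse).reverse) := by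
                simp

theorem alt_toList (s : String) :
    (reverse_words_and_chars_alt s).toList
      = (PySem.Chars.join [' '] ((PySem.Str.split₀ s).map String.toList)).reverse := by
  show ((PySem.Str.slice? (PySem.Str.join " " (PySem.Str.split₀ s)) none none (-1)).getD "").toList
      = (PySem.Chars.join [' '] ((PySem.Str.split₀ s).map String.toList)).reverse
  rw [PySem.Str.slice?_none_none_neg_one]
  simp [PySem.Str.toList_join]

-- ===== VERDICT (by name: the statement is the Claim_ definition above) =====
theorem reverse_words_and_chars_spec : Claim_equal_reverse_words_and_chars := by
  intro s _
  unfold Spec_reverse_words_and_chars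
  apply String.toList_injective
  rw [alt_toList, rev_join]
  unfold reverse_words_and_chars
  by_cases h : s = ""
  · subst h; decide
  · simp only [h, if_false]
    rw [PySem.Str.toList_join]
    rw [PySem.List.slice?_none_none_neg_one]
    congr 1
    simp only [Option.getD_some, List.map_map, List.map_reverse]
    congr 1
    apply List.map_congr_left
    intro w _
    simp [PySem.Str.slice?_none_none_neg_one]
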